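-- pv_equiv track=rewrite | github.com/tngjunwei/adventofcode2023 | day11.py | _init_new_lookup
-- ===== SOURCE A (Python) =====
-- def _init_new_lookup(empty, dim_size):
--     empty_idx = 0
--     lookup = {}
--     extra = 0
--
--     for i in range(dim_size):
--         if empty_idx < len(empty) and i == empty[empty_idx]:
--             extra += 999_999
--             empty_idx += 1
--         lookup[i] = i + extra
--
--     return lookup
-- ===== SOURCE B (Python) =====
-- def _init_new_lookup(empty, dim_size):
--     # Span-filling over the empty markers: fill whole runs between consecutive
--     # markers with a constant offset instead of testing every index against the
--     # marker pointer.
--     lookup = {}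
--     i = 0
--     extra = 0
--     for e in empty:
--         if not (i <= e < dim_size):
--             break
--         for j in range(i, e):
--             lookup[j] = j + extra
--         extra += 999_999
--         lookup[e] = e + extra
--         i = e + 1
--     for j in range(i, dim_size):
--         lookup[j] = j + extra
--     return lookup
-- ===== Notes on version B (the rewrite author's own statement) =====
-- stated objective: alternative
-- what changed: A tests every index 0..dim_size-1 against the current empty-marker pointer; B instead walks the empty markers and bulk-fills each span between consecutive markers with a constant offset, breaking once a marker falls outside the remaining range.
import Mathlib
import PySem

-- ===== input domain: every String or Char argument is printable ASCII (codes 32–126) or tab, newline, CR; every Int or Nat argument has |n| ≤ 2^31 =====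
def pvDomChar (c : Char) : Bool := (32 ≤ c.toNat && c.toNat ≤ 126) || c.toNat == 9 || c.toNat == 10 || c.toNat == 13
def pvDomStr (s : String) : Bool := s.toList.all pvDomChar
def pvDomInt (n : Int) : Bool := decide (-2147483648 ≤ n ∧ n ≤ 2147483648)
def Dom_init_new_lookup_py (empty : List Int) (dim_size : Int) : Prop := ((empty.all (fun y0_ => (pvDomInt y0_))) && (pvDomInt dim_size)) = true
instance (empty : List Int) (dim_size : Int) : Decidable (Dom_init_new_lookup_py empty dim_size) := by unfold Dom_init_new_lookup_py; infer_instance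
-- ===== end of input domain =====

-- B replaces A's per-index marker-pointer scan by a span-filling pass over the markers (alternative decomposition, same cost).


-- ===== PORT A =====
-- A's loop body: advance the marker pointer on a hit, then write lookup[i] = i + extra.
def pvStepA (empty : List Int) (st : Int × PySem.Dict Int Int × Int) (i : Int) :
    Int × PySem.Dict Int Int × Int :=
  let st' :=
    if st.1 < (empty.length : Int) ∧ PySem.List.pyGet? empty st.1 = some i
    then (st.1 + 1, st.2.1, st.2.2 + 999999)
    else st
  (st'.1, st'.2.1.insert i (i + st'.2.2), st'.2.2)

def init_new_lookup_py (empty : List Int) (dim_size : Int) : List (Int × Int) :=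
  (((PySem.List.pyRange 0 dim_size 1).foldl (pvStepA empty)
      ((0 : Int), PySem.Dict.empty, (0 : Int))).2.1).items

-- ===== PORT B =====
-- fill lookup[j] = j + extra for j in range(a, b)
def pvFill (a b extra : Int) (d : PySem.Dict Int Int) : PySem.Dict Int Int :=
  (PySem.List.pyRange a b 1).foldl (fun d j => d.insert j (j + extra)) d

def pvAltGo (dim_size : Int) : List Int → Int → Int → PySem.Dict Int Int → PySem.Dict Int Int
  | [], i, extra, d => pvFill i dim_size extra d
  | e :: rest, i, extra, d =>
    if i ≤ e ∧ e < dim_size then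
      pvAltGo dim_size rest (e + 1) (extra + 999999)
        ((pvFill i e extra d).insert e (e + (extra + 999999)))
    else pvFill i dim_size extra d

def init_new_lookup_py_alt (empty : List Int) (dim_size : Int) : List (Int × Int) :=
  (pvAltGo dim_size empty 0 0 PySem.Dict.empty).items

-- ===== PRECONDITION & SPEC =====
def Spec_init_new_lookup_py (empty : List Int) (dim_size : Int) (out : List (Int × Int)) : Prop := out = init_new_lookup_py_alt empty dim_size
instance (empty : List Int) (dim_size : Int) (out : List (Int × Int)) : Decidable (Spec_init_new_lookup_py empty dim_size out) := by unfold Spec_init_new_lookup_py; infer_instance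

-- ===== CLAIM (what is proved, stated in full; the proofs are below) =====
def Claim_equal_init_new_lookup_py : Prop := ∀ (empty : List Int) (dim_size : Int), Dom_init_new_lookup_py empty dim_size → Spec_init_new_lookup_py empty dim_size (init_new_lookup_py empty dim_size)

-- ===== LEMMAS AND PROOFS =====

lemma pvFill_nil (i b x : Int) (d : PySem.Dict Int Int) (h : b ≤ i) :
    pvFill i b x d = d := by
  unfold pvFill
  rw [PySem.List.pyRange_one_eq_nil h]
  rfl

lemma pvFill_cons (i b x : Int) (d : PySem.Dict Int Int) (h : i < b) :
    pvFill i b x d = pvFill (i + 1) b x (d.insert i (i + x)) := by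
  unfold pvFill
  rw [PySem.List.pyRange_one_cons h]
  rfl

lemma pvKey (empty : List Int) :
    ∀ (m : Nat) (n i : Int) (k : Nat) (d : PySem.Dict Int Int) (x : Int),
      (n - i).toNat = m →
      ((PySem.List.pyRange i n 1).foldl (pvStepA empty) ((k : Int), d, x)).2.1
        = pvAltGo n (empty.drop k) i x d := by
  intro m
  induction m with
  | zero =>
    intro n i k d x hm
    have hni : n ≤ i := by omega
    rw [PySem.List.pyRange_one_eq_nil hni]
    cases hdk : empty.drop k with
    | nil => simp [pvAltGo, pvFill_nil _ _ _ _ hni]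
    | cons e rest =>
      simp only [pvAltGo, List.foldl_nil]
      rw [if_neg (by omega), pvFill_nil _ _ _ _ hni]
  | succ m ih =>
    intro n i k d x hm
    have hin : i < n := by omega
    rw [PySem.List.pyRange_one_cons hin, List.foldl_cons]
    have hget : PySem.List.pyGet? empty (k : Int) = empty[k]? :=
      PySem.List.pyGet?_natCast empty k
    cases hdk : empty.drop k with
    | nil =>
      have hk : empty.length ≤ k := List.drop_eq_nil_iff.mp hdk
      have hstep : pvStepA empty ((k : Int), d, x) i = ((k : Int), d.insert i (i + x), x) := by
        unfold pvStepA
        rw [if_neg]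
        intro h
        have h1 : (k : Int) < (empty.length : Int) := h.1
        have : k < empty.length := by exact_mod_cast h1
        omega
      rw [hstep]
      have hdk1 : empty.drop (k + 1) = [] := List.drop_eq_nil_iff.mpr (by omega)
      have hI := ih n (i + 1) k (d.insert i (i + x)) x (by omega)
      rw [hdk] at hI
      rw [hI]
      simp only [pvAltGo]
      rw [pvFill_cons _ _ _ _ hin]
    | cons e rest =>
      have hk : k < empty.length := by
        have hlen : (empty.drop k).length = rest.length + 1 := by rw [hdk]; rfl
        rw [List.length_drop] at hlen
        omega
      have he : empty[k]? = some e := by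
        rw [← List.head?_drop, hdk, List.head?_cons]
      have hdk1 : empty.drop (k + 1) = rest := by
        rw [← List.tail_drop, hdk, List.tail_cons]
      by_cases hei : e = i
      · have hstep : pvStepA empty ((k : Int), d, x) i
            = ((((k + 1 : Nat)) : Int), d.insert i (i + (x + 999999)), x + 999999) := by
          unfold pvStepA
          rw [if_pos]
          · push_cast
            rfl
          · refine ⟨?_, by rw [hget, he, hei]⟩
            show (k : Int) < (empty.length : Int)
            exact_mod_cast hk
        rw [hstep]
        have hI := ih n (i + 1) (k + 1) (d.insert i (i + (x + 999999))) (x + 999999) (by omega)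
        rw [hdk1] at hI
        rw [hI]
        simp only [pvAltGo]
        rw [if_pos ⟨le_of_eq hei.symm, by omega⟩]
        rw [hei, pvFill_nil _ _ _ _ le_rfl]
      · have hstep : pvStepA empty ((k : Int), d, x) i = ((k : Int), d.insert i (i + x), x) := by
          unfold pvStepA
          rw [if_neg]
          intro h
          have h2 : PySem.List.pyGet? empty (k : Int) = some i := h.2
          rw [hget, he] at h2
          exact hei (Option.some.inj h2)
        rw [hstep]
        have hI := ih n (i + 1) k (d.insert i (i + x)) x (by omega)
        rw [hdk] at hI
        rw [hI]
        by_cases hc : i ≤ e ∧ e < n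
        · have hie : i < e := lt_of_le_of_ne hc.1 (fun h => hei h.symm)
          simp only [pvAltGo]
          rw [if_pos ⟨by omega, hc.2⟩, if_pos hc, pvFill_cons i e x d hie]
        · simp only [pvAltGo]
          rw [if_neg (by omega), if_neg hc, pvFill_cons _ _ _ _ hin]

theorem init_new_lookup_py_spec' :
    ∀ (empty : List Int) (dim_size : Int),
      init_new_lookup_py empty dim_size = init_new_lookup_py_alt empty dim_size := by
  intro empty n
  unfold init_new_lookup_py init_new_lookup_py_alt
  have h := pvKey empty (n - 0).toNat n 0 0 PySem.Dict.empty 0 rfl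
  simpa using congrArg PySem.Dict.items h

-- ===== VERDICT (by name: the statement is the Claim_ definition above) =====
theorem init_new_lookup_py_spec : Claim_equal_init_new_lookup_py := by
  intro empty n _
  exact init_new_lookup_py_spec' empty n
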